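-- pv_equiv track=rewrite | github.com/PaddlePaddle/Paddle | tools/reduce_lib_size_util.py | grad_kernel_definition
-- ===== SOURCE A (Python) =====
-- def is_balanced(content):
--     """
--     Check whether sequence contains valid parenthesis.
--     Args:
--        content (str): content of string.
--
--     Returns:
--         boolean: True if sequence contains valid parenthesis.
--     """
--
--     if content.find('{') == -1:
--         return False
--     stack = []
--     push_chars, pop_chars = '({', ')}'
--     for c in content:
--         if c in push_chars:
--             stack.append(c)
--         elif c in pop_chars:
--             if not len(stack):
--                 return False
--             else:
--                 stack_top = stack.pop()
--                 balancing_bracket = push_chars[pop_chars.index(c)]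
--                 if stack_top != balancing_bracket:
--                     return False
--     return not stack
--
-- def grad_kernel_definition(content, kernel_pattern, grad_pattern):
--     """
--     Args:
--        content(str): file content
--        kernel_pattern(str): kernel pattern
--        grad_pattern(str): grad pattern
--
--     Returns:
--         (list, int): grad kernel definitions in file and count.
--     """
--
--     results = []
--     count = 0
--     start = 0
--     lens = len(content)
--     while True:
--         index = content.find(kernel_pattern, start)
--         if index == -1:
--             return results, count
--         i = index + 1
--         while i <= lens:
--             check_str = content[index:i]
--             if is_balanced(check_str):
--                 if check_str.find(grad_pattern) != -1:
--                     results.append(check_str)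
--                     count += 1
--                 start = i
--                 break
--             i += 1
--         else:
--             return results, count
-- ===== SOURCE B (Python) =====
-- def grad_kernel_definition(content, kernel_pattern, grad_pattern):
--     """
--     Single-pass bracket scan per kernel occurrence: instead of re-checking each
--     growing prefix for balance, track the bracket stack and '{'-presence
--     incrementally and stop at the first position where the block closes.
--     """
--     results = []
--     count = 0
--     start = 0
--     n = len(content)
--     while True:
--         index = content.find(kernel_pattern, start)
--         if index == -1:
--             return results, count
--         stack = []
--         seen_brace = False
--         end = -1
--         for j in range(index, n):
--             c = content[j]
--             if c == '(' or c == '{':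
--                 stack.append(c)
--                 if c == '{':
--                     seen_brace = True
--             elif c == ')' or c == '}':
--                 want = '(' if c == ')' else '{'
--                 if not stack or stack[-1] != want:
--                     break
--                 stack.pop()
--             if seen_brace and not stack:
--                 end = j + 1
--                 break
--         if end == -1:
--             return results, count
--         block = content[index:end]
--         if grad_pattern in block:
--             results.append(block)
--             count += 1
--         start = end
-- ===== Notes on version B (the rewrite author's own statement) =====
-- stated objective: faster
-- what changed: A re-runs the full is_balanced check on every growing prefix after each kernel occurrence (quadratic in block length); B finds each block with one incremental scan that maintains the bracket stack and a '{'-seen flag, stopping at the first position where the stack empties after a '{'.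
import Mathlib
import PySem

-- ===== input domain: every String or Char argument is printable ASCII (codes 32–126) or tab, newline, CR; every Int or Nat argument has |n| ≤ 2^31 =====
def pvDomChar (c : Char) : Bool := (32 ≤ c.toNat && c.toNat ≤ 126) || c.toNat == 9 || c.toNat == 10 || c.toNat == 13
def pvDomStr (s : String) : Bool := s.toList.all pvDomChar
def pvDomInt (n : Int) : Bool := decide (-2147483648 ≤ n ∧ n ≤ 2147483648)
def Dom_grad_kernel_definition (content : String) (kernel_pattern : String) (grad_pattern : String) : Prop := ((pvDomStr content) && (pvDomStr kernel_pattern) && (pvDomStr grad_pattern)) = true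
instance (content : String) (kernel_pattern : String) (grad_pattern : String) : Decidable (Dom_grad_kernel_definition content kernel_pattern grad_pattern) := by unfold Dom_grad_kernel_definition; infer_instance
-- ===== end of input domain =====

-- B replaces A's quadratic inner search (re-running is_balanced on every growing prefix)
-- by one incremental bracket-stack scan per kernel occurrence; objective: faster.

-- ===== PORT A =====

-- A's is_balanced for-loop: Python list stack ported as a cons-list (append = cons, pop = head)
def pvBalLoop : List Char → List Char → Bool
  | stack, [] => stack.isEmpty            -- `return not stack`
  | stack, c :: rest =>
    if c = '(' ∨ c = '{' then             -- `c in push_chars`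
      pvBalLoop (c :: stack) rest
    else if c = ')' ∨ c = '}' then        -- `c in pop_chars`
      match stack with
      | [] => false                       -- `if not len(stack): return False`
      | stack_top :: stack' =>
        -- balancing_bracket = push_chars[pop_chars.index(c)]
        if stack_top ≠ (if c = ')' then '(' else '{') then false
        else pvBalLoop stack' rest
    else pvBalLoop stack rest

def pvIsBalanced (cs : List Char) : Bool :=
  if PySem.Chars.find cs ['{'] = -1 then false    -- `content.find('{') == -1`
  else pvBalLoop [] cs

-- A's inner `while i <= lens` loop: returns the break index i, none = while-else.
-- The Nat argument after i is a fuel guard only (the loop runs at most lens+1-i times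
-- and every caller passes content.length + 1, which always suffices).
def pvInnerA (content : List Char) (index : Nat) : Nat → Nat → Option Nat
  | _, 0 => none
  | i, fuel + 1 =>
    if i ≤ content.length then
      if pvIsBalanced (PySem.List.slice content (some (index : Int)) (some (i : Int))) then
        some i
      else pvInnerA content index (i + 1) fuel
    else none

-- A's outer `while True` loop; the trailing Nat is a fuel guard only (start strictly
-- increases and stays ≤ lens, so content.length + 2 iterations always suffice).
def pvOuterA (content kp gp : List Char) : Nat → List String → Int → Nat → List String × Int
  | _, results, count, 0 => (results, count)
  | start, results, count, fuel + 1 =>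
    let idx := PySem.Chars.findFrom content kp (start : Int) none
    if idx = -1 then (results, count)
    else
      match pvInnerA content idx.toNat (idx.toNat + 1) (content.length + 1) with
      | none => (results, count)
      | some i =>
        let check := PySem.List.slice content (some (idx.toNat : Int)) (some (i : Int))
        if PySem.Chars.find check gp ≠ -1 then
          pvOuterA content kp gp i (results ++ [String.ofList check]) (count + 1) fuel
        else
          pvOuterA content kp gp i results count fuel

def grad_kernel_definition (content : String) (kernel_pattern : String) (grad_pattern : String) :
    List String × Int :=
  pvOuterA content.toList kernel_pattern.toList grad_pattern.toList 0 [] 0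
    (content.toList.length + 2)

-- ===== PORT B =====

-- B's incremental scan `for j in range(index, n)` over content[index:]; returns `end` (none = end == -1)
def pvScanB (stack : List Char) (seen : Bool) (j : Nat) : List Char → Option Nat
  | [] => none
  | c :: rest =>
    if c = '(' ∨ c = '{' then
      let stack' := c :: stack
      let seen' := seen || decide (c = '{')
      if seen' && stack'.isEmpty then some (j + 1) else pvScanB stack' seen' (j + 1) rest
    else if c = ')' ∨ c = '}' then
      match stack with
      | [] => none                                       -- `break`
      | top :: stack' =>
        if top ≠ (if c = ')' then '(' else '{') then none -- `break`
        else if seen && stack'.isEmpty then some (j + 1)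
        else pvScanB stack' seen (j + 1) rest
    else
      if seen && stack.isEmpty then some (j + 1) else pvScanB stack seen (j + 1) rest

-- B's outer `while True` loop; same fuel guard as A's outer loop
def pvOuterB (content kp gp : List Char) : Nat → List String → Int → Nat → List String × Int
  | _, results, count, 0 => (results, count)
  | start, results, count, fuel + 1 =>
    let idx := PySem.Chars.findFrom content kp (start : Int) none
    if idx = -1 then (results, count)
    else
      match pvScanB [] false idx.toNat (content.drop idx.toNat) with
      | none => (results, count)
      | some e =>
        let block := PySem.List.slice content (some (idx.toNat : Int)) (some (e : Int))
        if PySem.Chars.isIn gp block then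
          pvOuterB content kp gp e (results ++ [String.ofList block]) (count + 1) fuel
        else
          pvOuterB content kp gp e results count fuel

def grad_kernel_definition_alt (content : String) (kernel_pattern : String) (grad_pattern : String) :
    List String × Int :=
  pvOuterB content.toList kernel_pattern.toList grad_pattern.toList 0 [] 0
    (content.toList.length + 2)

-- ===== PRECONDITION & SPEC =====
def Spec_grad_kernel_definition (content : String) (kernel_pattern : String) (grad_pattern : String) (out : List String × Int) : Prop := out = grad_kernel_definition_alt content kernel_pattern grad_pattern
instance (content : String) (kernel_pattern : String) (grad_pattern : String) (out : List String × Int) : Decidable (Spec_grad_kernel_definition content kernel_pattern grad_pattern out) := by unfold Spec_grad_kernel_definition; infer_instance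

-- ===== CLAIM (what is proved, stated in full; the proofs are below) =====
def Claim_equal_grad_kernel_definition : Prop := ∀ (content : String) (kernel_pattern : String) (grad_pattern : String), Dom_grad_kernel_definition content kernel_pattern grad_pattern → Spec_grad_kernel_definition content kernel_pattern grad_pattern (grad_kernel_definition content kernel_pattern grad_pattern)

-- ===== LEMMAS AND PROOFS =====

theorem pvFindFrom_bounds (s sub : List Char) (k : Nat)
    (h : PySem.Chars.findFrom s sub (k : Int) none ≠ -1) :
    k ≤ (PySem.Chars.findFrom s sub (k : Int) none).toNat ∧
      (PySem.Chars.findFrom s sub (k : Int) none).toNat ≤ s.length := by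
  have hk : k ≤ s.length := by
    by_contra hk
    apply h
    have h0 : ¬((k : Int) < 0) := by omega
    have h1 : (s.length : Int) < (k : Int) := by omega
    simp [PySem.Chars.findFrom, h0, h1]
  rw [PySem.Chars.findFrom_natCast s sub k hk] at h ⊢
  have h1 := PySem.Chars.neg_one_le_find (s.drop k) sub
  have h2 := PySem.Chars.find_le_length (s.drop k) sub
  simp only [List.length_drop] at h2
  split at h
  · exact absurd rfl h
  · split
    · simp_all
    · constructor <;> omega

-- one step of A's stack automaton, as a fold step (none = the loop has already returned False)
def pvBalStep (o : Option (List Char)) (c : Char) : Option (List Char) :=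
  match o with
  | none => none
  | some stack =>
    if c = '(' ∨ c = '{' then some (c :: stack)
    else if c = ')' ∨ c = '}' then
      match stack with
      | [] => none
      | top :: stack' => if top ≠ (if c = ')' then '(' else '{') then none else some stack'
    else some stack

theorem pvBalFold_none (cs : List Char) : cs.foldl pvBalStep none = none := by
  induction cs with
  | nil => rfl
  | cons c rest ih => simpa [pvBalStep] using ih

theorem pvBalLoop_eq_fold (cs : List Char) : ∀ stack : List Char,
    pvBalLoop stack cs = ((cs.foldl pvBalStep (some stack)).map List.isEmpty).getD false := by
  induction cs with
  | nil => intro stack; simp [pvBalLoop]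
  | cons c rest ih =>
    intro stack
    by_cases h1 : c = '(' ∨ c = '{'
    · simp [pvBalLoop, pvBalStep, h1, ih]
    · by_cases h2 : c = ')' ∨ c = '}'
      · cases stack with
        | nil => simp [pvBalLoop, pvBalStep, h1, h2, pvBalFold_none]
        | cons top st =>
          by_cases h3 : top ≠ (if c = ')' then '(' else '{')
          · simp [pvBalLoop, pvBalStep, h1, h2, h3, pvBalFold_none]
          · simp [pvBalLoop, pvBalStep, h1, h2, h3, ih]
      · simp [pvBalLoop, pvBalStep, h1, h2, ih]

theorem pvMem_singleton_infix (cs : List Char) : ['{'] <:+: cs ↔ '{' ∈ cs := by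
  constructor
  · intro h; exact h.subset (List.mem_singleton_self _)
  · intro h
    obtain ⟨s, t, rfl⟩ := List.append_of_mem h
    exact ⟨s, t, by simp⟩

theorem pvIsBalanced_iff (cs : List Char) :
    pvIsBalanced cs = true ↔ cs.foldl pvBalStep (some []) = some [] ∧ '{' ∈ cs := by
  unfold pvIsBalanced
  by_cases hf : PySem.Chars.find cs ['{'] = -1
  · have hmem : '{' ∉ cs := by
      rw [← pvMem_singleton_infix]
      exact (PySem.Chars.find_eq_neg_one_iff cs ['{']).mp hf
    simp [hf, hmem]
  · have hmem : '{' ∈ cs := by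
      rw [← pvMem_singleton_infix]
      exact ((PySem.Chars.find_ne_neg_one_iff cs ['{']).mp hf)
    rw [if_neg hf, pvBalLoop_eq_fold]
    cases h : cs.foldl pvBalStep (some []) with
    | none => simp [hmem]
    | some st => simp [List.isEmpty_iff, hmem]

theorem pvInnerA_none (content : List Char) (index : Nat) :
    ∀ (fuel i : Nat), (∀ k, i ≤ k → k ≤ content.length →
      pvIsBalanced (PySem.List.slice content (some (index : Int)) (some (k : Int))) = false) →
    pvInnerA content index i fuel = none := by
  intro fuel
  induction fuel with
  | zero => intro i hall; rfl
  | succ f ih =>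
    intro i hall
    rw [pvInnerA]
    by_cases h : i ≤ content.length
    · rw [if_pos h, hall i le_rfl h]
      simp only [Bool.false_eq_true, if_false]
      exact ih (i + 1) (fun k hk1 hk2 => hall k (by omega) hk2)
    · rw [if_neg h]

theorem pvIsBalanced_take_false (t : List Char) (m k : Nat)
    (hf : (t.take m).foldl pvBalStep (some []) = none) (hmk : m ≤ k) :
    pvIsBalanced (t.take k) = false := by
  by_contra hb
  rw [Bool.not_eq_false, pvIsBalanced_iff] at hb
  have : t.take k = t.take m ++ (t.drop m).take (k - m) := by
    rw [← List.take_add]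
    congr 1
    omega
  rw [this, List.foldl_append, hf, pvBalFold_none] at hb
  simp at hb

-- MAIN: B's incremental scan finds exactly the break index of A's prefix loop
theorem pvScan_eq_inner (content : List Char) (index : Nat) (hidx : index ≤ content.length) :
    ∀ (rest pre stack : List Char) (seen : Bool) (fuel : Nat),
      content.drop index = pre ++ rest →
      pre.foldl pvBalStep (some []) = some stack →
      seen = pre.contains '{' →
      (∀ k, k ≤ pre.length → pvIsBalanced ((content.drop index).take k) = false) →
      content.length + 1 ≤ fuel + (index + pre.length + 1) →
      pvScanB stack seen (index + pre.length) rest =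
        pvInnerA content index (index + pre.length + 1) fuel := by
  intro rest
  induction rest with
  | nil =>
    intro pre stack seen fuel ht hfold hseen hbad hfuel
    have hlen : content.length = index + pre.length := by
      have := congrArg List.length ht
      simp [List.length_drop] at this
      omega
    cases fuel with
    | zero => rfl
    | succ f =>
      rw [pvInnerA, if_neg (by omega)]
      rfl
  | cons c rest' ih =>
    intro pre stack seen fuel ht hfold hseen hbad hfuel
    have hlen : content.length - index = pre.length + 1 + rest'.length := by
      have := congrArg List.length ht
      simp [List.length_drop] at this
      omega
    have hilen : index + pre.length + 1 ≤ content.length := by omega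
    cases fuel with
    | zero => omega
    | succ f =>
    have htake : (content.drop index).take (pre.length + 1) = pre ++ [c] := by
      rw [ht, List.take_append]
      simp
    have hfold1 : (pre ++ [c]).foldl pvBalStep (some []) = pvBalStep (some stack) c := by
      rw [List.foldl_append, hfold]
      rfl
    have hslice : PySem.List.slice content (some (index : Int))
        (some ((index + pre.length + 1 : Nat) : Int)) = pre ++ [c] := by
      rw [PySem.List.slice_natCast, show index + pre.length + 1 - index = pre.length + 1 from by omega]
      exact htake
    -- the `none forever' argument, used whenever the step fails
    have hdead : pvBalStep (some stack) c = none →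
        pvInnerA content index (index + pre.length + 1) (f + 1) = none := by
      intro hstep
      apply pvInnerA_none
      intro k hk1 hk2
      rw [PySem.List.slice_natCast]
      exact pvIsBalanced_take_false _ (pre.length + 1) _
        (by rw [htake, hfold1, hstep]) (by omega)
    -- the `first success' argument
    have hgood : ∀ stack2, pvBalStep (some stack) c = some stack2 → stack2 = [] →
        '{' ∈ pre ++ [c] →
        pvInnerA content index (index + pre.length + 1) (f + 1) = some (index + pre.length + 1) := by
      intro stack2 hstep h2 hmem
      rw [pvInnerA, if_pos hilen, hslice,
        if_pos ((pvIsBalanced_iff _).mpr ⟨by rw [hfold1, hstep, h2], hmem⟩)]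
    -- the `continue' argument
    have hcont : ∀ stack2 seen2, pvBalStep (some stack) c = some stack2 →
        seen2 = ((pre ++ [c]).contains '{') → ¬(stack2 = [] ∧ seen2 = true) →
        pvScanB stack2 seen2 (index + pre.length + 1) rest' =
          pvInnerA content index (index + pre.length + 1) (f + 1) := by
      intro stack2 seen2 hstep hseen2 hnot
      have hbal : pvIsBalanced (pre ++ [c]) = false := by
        by_contra hb
        rw [Bool.not_eq_false, pvIsBalanced_iff, hfold1, hstep] at hb
        refine hnot ⟨by simpa using hb.1, ?_⟩
        rw [hseen2, List.contains_iff_mem]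
        exact hb.2
      have := ih (pre ++ [c]) stack2 seen2 f
        (by rw [ht]; simp)
        (by rw [hfold1, hstep])
        hseen2
        (by
          intro k hk
          simp only [List.length_append, List.length_cons, List.length_nil] at hk
          rcases Nat.lt_or_ge k (pre.length + 1) with hlt | hge
          · exact hbad k (by omega)
          · have hk1 : k = pre.length + 1 := by omega
            rw [hk1, htake]
            exact hbal)
        (by simp only [List.length_append, List.length_cons, List.length_nil]; omega)
      simp only [List.length_append, List.length_cons, List.length_nil] at this
      rw [show index + (pre.length + 1) = index + pre.length + 1 from by omega] at this
      rw [this]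
      conv_rhs => rw [pvInnerA]
      rw [if_pos hilen, hslice, hbal]
      simp only [Bool.false_eq_true, if_false]
    have hcnotbrace : ¬(c = '(' ∨ c = '{') → (pre ++ [c]).contains '{' = pre.contains '{' := by
      intro h1
      have : c ≠ '{' := fun hc => h1 (Or.inr hc)
      simp [Ne.symm this]
    by_cases h1 : c = '(' ∨ c = '{'
    · -- push branch
      have hstep : pvBalStep (some stack) c = some (c :: stack) := by simp [pvBalStep, h1]
      have hseen2 : (seen || decide (c = '{')) = ((pre ++ [c]).contains '{') := by
        rw [hseen]
        by_cases hc : c = '{'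
        · simp [hc]
        · simp [hc, Ne.symm hc]
      simp only [pvScanB, if_pos h1, List.isEmpty_cons, Bool.and_false, Bool.false_eq_true, if_false]
      exact hcont (c :: stack) (seen || decide (c = '{')) hstep hseen2 (by simp)
    · by_cases h2 : c = ')' ∨ c = '}'
      · cases stack with
        | nil =>
          have hstep : pvBalStep (some []) c = none := by
            simp [pvBalStep, h1, h2]
          simp only [pvScanB, if_neg h1, if_pos h2]
          exact (hdead hstep).symm
        | cons top stack' =>
          by_cases h3 : top ≠ (if c = ')' then '(' else '{')
          · have hstep : pvBalStep (some (top :: stack')) c = none := by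
              simp only [pvBalStep, if_neg h1, if_pos h2]
              rw [if_pos h3]
            simp only [pvScanB, if_neg h1, if_pos h2]
            rw [if_pos h3]
            exact (hdead hstep).symm
          · have hstep : pvBalStep (some (top :: stack')) c = some stack' := by
              simp only [pvBalStep, if_neg h1, if_pos h2]
              rw [if_neg h3]
            have hcnb := hcnotbrace h1
            simp only [pvScanB, if_neg h1, if_pos h2]
            rw [if_neg h3]
            by_cases h4 : (seen && stack'.isEmpty) = true
            · rw [if_pos h4]
              simp only [Bool.and_eq_true, List.isEmpty_iff] at h4
              refine (hgood stack' hstep h4.2 ?_).symm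
              apply List.mem_append_left
              rw [← List.contains_iff_mem, ← hseen]
              exact h4.1
            · rw [if_neg h4]
              apply hcont stack' seen hstep (by rw [hseen, hcnb])
              intro ⟨he, hs⟩
              exact h4 (by simp [hs, he])
      · -- plain character
        have hstep : pvBalStep (some stack) c = some stack := by
          simp [pvBalStep, h1, h2]
        have hcnb := hcnotbrace h1
        simp only [pvScanB, if_neg h1, if_neg h2]
        by_cases h4 : (seen && stack.isEmpty) = true
        · rw [if_pos h4]
          simp only [Bool.and_eq_true, List.isEmpty_iff] at h4
          refine (hgood stack hstep h4.2 ?_).symm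
          apply List.mem_append_left
          rw [← List.contains_iff_mem, ← hseen]
          exact h4.1
        · rw [if_neg h4]
          apply hcont stack seen hstep (by rw [hseen, hcnb])
          intro ⟨he, hs⟩
          exact h4 (by simp [hs, he])

theorem pvOuter_eq (content kp gp : List Char) :
    ∀ (fuel start : Nat) (results : List String) (count : Int),
    pvOuterA content kp gp start results count fuel = pvOuterB content kp gp start results count fuel := by
  intro fuel
  induction fuel with
  | zero => intro start results count; rfl
  | succ f ihn =>
    intro start results count
    rw [pvOuterA, pvOuterB]
    by_cases hidx : PySem.Chars.findFrom content kp (start : Int) none = -1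
    · rw [if_pos hidx, if_pos hidx]
    · rw [if_neg hidx, if_neg hidx]
      have hfb := pvFindFrom_bounds content kp start hidx
      have hkey : pvScanB [] false (PySem.Chars.findFrom content kp (start : Int) none).toNat
          (content.drop (PySem.Chars.findFrom content kp (start : Int) none).toNat) =
          pvInnerA content (PySem.Chars.findFrom content kp (start : Int) none).toNat
            ((PySem.Chars.findFrom content kp (start : Int) none).toNat + 1)
            (content.length + 1) := by
        have := pvScan_eq_inner content (PySem.Chars.findFrom content kp (start : Int) none).toNat
          hfb.2 (content.drop (PySem.Chars.findFrom content kp (start : Int) none).toNat)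
          [] [] false (content.length + 1) rfl rfl rfl
          (by intro k hk; simp only [List.length_nil, Nat.le_zero] at hk; subst hk; rfl)
          (by omega)
        simpa using this
      split
      · -- A's inner loop found no block
        rename_i hinner
        split
        · rfl
        · rename_i e hscan
          rw [hkey, hinner] at hscan
          cases hscan
      · -- A's inner loop found block end i
        rename_i i hinner
        split
        · rename_i hscan
          rw [hkey, hinner] at hscan
          cases hscan
        · rename_i e hscan
          rw [hkey, hinner] at hscan
          injection hscan with hscan
          subst hscan
          simp only [ne_eq]
          by_cases hc : PySem.Chars.find
              (PySem.List.slice content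
                (some ((PySem.Chars.findFrom content kp (start : Int) none).toNat : Int))
                (some (i : Int))) gp = -1
          · rw [if_neg (not_not_intro hc), if_neg (by
              rw [PySem.Chars.isIn_iff_infix]
              exact (PySem.Chars.find_eq_neg_one_iff _ _).mp hc)]
            exact ihn i _ _
          · rw [if_pos hc, if_pos (by
              rw [PySem.Chars.isIn_iff_infix]
              exact (PySem.Chars.find_ne_neg_one_iff _ _).mp hc)]
            exact ihn i _ _

-- ===== VERDICT (by name: the statement is the Claim_ definition above) =====
theorem grad_kernel_definition_spec : Claim_equal_grad_kernel_definition := by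
  intro content kp gp _
  unfold Spec_grad_kernel_definition grad_kernel_definition grad_kernel_definition_alt
  exact pvOuter_eq _ _ _ _ 0 [] 0
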